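-- pv_equiv track=rewrite | github.com/bolknote/Bolklets | tools/train_dialog.py | has_stutter_loop
-- ===== SOURCE A (Python) =====
-- def alpha_tokens(tokens):
--     return [t for t in tokens if t.isalpha()]
--
-- def has_stutter_loop(tokens):
--     alpha = alpha_tokens(tokens)
--     if len(alpha) < 4:
--         return False
--     run = 1
--     for i in range(1, len(alpha)):
--         if alpha[i] == alpha[i - 1]:
--             run += 1
--             if run >= 3:
--                 return True
--         else:
--             run = 1
--     if len(alpha) >= 6:
--         for i in range(0, len(alpha) - 5):
--             if alpha[i:i + 2] == alpha[i + 2:i + 4] == alpha[i + 4:i + 6]: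
--                 return True
--     return False
-- ===== SOURCE B (Python) =====
-- def has_stutter_loop(tokens):
--     alpha = [t for t in tokens if t.isalpha()]
--     if len(alpha) < 4:
--         return False
--     eq = 0
--     per2 = 0
--     for i in range(1, len(alpha)):
--         eq = eq + 1 if alpha[i] == alpha[i - 1] else 0
--         if eq >= 2:
--             return True
--         if i >= 2:
--             per2 = per2 + 1 if alpha[i] == alpha[i - 2] else 0
--             if per2 >= 4:
--                 return True
--     return False
-- ===== Notes on version B (the rewrite author's own statement) =====
-- stated objective: alternative
-- what changed: A's two separate index loops (a run counter for triples, then a slice-comparing scan for repeated bigrams) are fused into one left-to-right pass maintaining two counters (consecutive adjacent matches and consecutive period-2 matches) with no slicing.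
import Mathlib
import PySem

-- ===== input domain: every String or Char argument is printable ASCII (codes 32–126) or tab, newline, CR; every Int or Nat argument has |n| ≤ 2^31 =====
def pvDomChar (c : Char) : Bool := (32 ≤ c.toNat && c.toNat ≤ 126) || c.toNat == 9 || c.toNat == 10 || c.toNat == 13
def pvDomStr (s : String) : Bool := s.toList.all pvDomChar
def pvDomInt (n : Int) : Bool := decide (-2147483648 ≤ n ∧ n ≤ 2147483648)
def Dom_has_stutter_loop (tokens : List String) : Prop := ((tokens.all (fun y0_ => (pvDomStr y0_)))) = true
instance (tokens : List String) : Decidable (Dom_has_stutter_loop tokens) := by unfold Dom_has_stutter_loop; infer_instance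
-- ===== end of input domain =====

-- B fuses A's two separate index loops (run counter, then slice-comparing scan) into one pass with two match counters; equivalence proved on all inputs.

-- ===== PORT A =====
def alpha_tokens (tokens : List String) : List String :=
  tokens.filter (fun t => PySem.Str.strIsalpha t)

-- A's 'for i in range(1, len(alpha))' with the run counter; early 'return True' = true
def arun (a : List String) (i run : Nat) : Bool :=
  if i < a.length then
    if a.getD i "" == a.getD (i - 1) "" then
      if 3 ≤ run + 1 then true else arun a (i + 1) (run + 1)
    else arun a (i + 1) 1
  else false
termination_by a.length - i

-- A's 'for i in range(0, len(alpha) - 5)' comparing slices; early 'return True' = true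
def abig (a : List String) (i : Nat) : Bool :=
  if i < a.length - 5 then
    if (PySem.List.slice a (some (i : Int)) (some ((i : Int) + 2)) ==
          PySem.List.slice a (some ((i : Int) + 2)) (some ((i : Int) + 4))) &&
       (PySem.List.slice a (some ((i : Int) + 2)) (some ((i : Int) + 4)) ==
          PySem.List.slice a (some ((i : Int) + 4)) (some ((i : Int) + 6))) then true
    else abig a (i + 1)
  else false
termination_by a.length - 5 - i

def has_stutter_loop (tokens : List String) : Bool :=
  let alpha := alpha_tokens tokens
  if alpha.length < 4 then false
  else if arun alpha 1 1 then true
  else if 6 ≤ alpha.length then abig alpha 0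
  else false

-- ===== PORT B =====
-- B's single pass: eq = consecutive adjacent matches, p2 = consecutive period-2 matches
def bloop (a : List String) (i eq p2 : Nat) : Bool :=
  if i < a.length then
    let eq' := if a.getD i "" == a.getD (i - 1) "" then eq + 1 else 0
    if 2 ≤ eq' then true
    else if 2 ≤ i then
      let p2' := if a.getD i "" == a.getD (i - 2) "" then p2 + 1 else 0
      if 4 ≤ p2' then true else bloop a (i + 1) eq' p2'
    else bloop a (i + 1) eq' p2
  else false
termination_by a.length - i

def has_stutter_loop_alt (tokens : List String) : Bool :=
  let alpha := tokens.filter (fun t => PySem.Str.strIsalpha t)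
  if alpha.length < 4 then false
  else bloop alpha 1 0 0

-- ===== PRECONDITION & SPEC =====
def Spec_has_stutter_loop (tokens : List String) (out : Bool) : Prop := out = has_stutter_loop_alt tokens
instance (tokens : List String) (out : Bool) : Decidable (Spec_has_stutter_loop tokens out) := by unfold Spec_has_stutter_loop; infer_instance

-- ===== CLAIM (what is proved, stated in full; the proofs are below) =====
def Claim_equal_has_stutter_loop : Prop := ∀ (tokens : List String), Dom_has_stutter_loop tokens → Spec_has_stutter_loop tokens (has_stutter_loop tokens)

-- ===== LEMMAS AND PROOFS =====

-- three equal consecutive tokens ending at index j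
def TripAt (a : List String) (j : Nat) : Prop :=
  2 ≤ j ∧ j < a.length ∧ a.getD j "" = a.getD (j - 1) "" ∧ a.getD (j - 1) "" = a.getD (j - 2) ""

-- four consecutive period-2 matches ending at index j (= a bigram repeated thrice)
def QuadAt (a : List String) (j : Nat) : Prop :=
  5 ≤ j ∧ j < a.length ∧ a.getD j "" = a.getD (j - 2) "" ∧ a.getD (j - 1) "" = a.getD (j - 3) "" ∧
    a.getD (j - 2) "" = a.getD (j - 4) "" ∧ a.getD (j - 3) "" = a.getD (j - 5) ""

lemma exists_ge_succ_iff {P : Nat → Prop} (i : Nat) :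
    (∃ j, i ≤ j ∧ P j) ↔ P i ∨ (∃ j, i + 1 ≤ j ∧ P j) := by
  constructor
  · rintro ⟨j, hj, hP⟩
    rcases Nat.eq_or_lt_of_le hj with rfl | h
    · exact Or.inl hP
    · exact Or.inr ⟨j, h, hP⟩
  · rintro (h | ⟨j, hj, hP⟩)
    · exact ⟨i, le_refl _, h⟩
    · exact ⟨j, by omega, hP⟩

lemma arun_spec (a : List String) : ∀ i run, 1 ≤ i → 1 ≤ run →
    (arun a i run = true ↔
      (∃ j, i + 1 ≤ j ∧ TripAt a j) ∨
        (2 ≤ run ∧ i < a.length ∧ a.getD i "" = a.getD (i - 1) "")) := by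
  intro i run
  induction i, run using arun.induct (a := a) with
  | case1 i run hlt hm hthr =>
    intro hi hrun
    rw [arun, if_pos hlt, if_pos hm, if_pos hthr]
    have hm' : a.getD i "" = a.getD (i - 1) "" := by simpa using hm
    simp only [true_iff]
    exact Or.inr ⟨by omega, hlt, hm'⟩
  | case2 i run hlt hm hthr ih =>
    intro hi hrun
    rw [arun, if_pos hlt, if_pos hm, if_neg hthr]
    rw [ih (by omega) (by omega)]
    have hm' : a.getD i "" = a.getD (i - 1) "" := by simpa using hm
    have e1 : i + 1 - 1 = i := by omega
    have e2 : i + 1 - 2 = i - 1 := by omega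
    constructor
    · rintro (⟨j, hj, hT⟩ | ⟨_, h1, h2⟩)
      · exact Or.inl ⟨j, by omega, hT⟩
      · refine Or.inl ⟨i + 1, le_refl _, ⟨by omega, h1, ?_, ?_⟩⟩
        · rw [e1]; exact h2
        · rw [e1, e2]; exact hm'
    · rintro (⟨j, hj, hT⟩ | ⟨h2run, _, _⟩)
      · rcases Nat.eq_or_lt_of_le hj with rfl | hlt2
        · obtain ⟨_, hjl, ha1, _⟩ := hT
          rw [e1] at ha1
          exact Or.inr ⟨by omega, hjl, ha1⟩
        · exact Or.inl ⟨j, by omega, hT⟩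
      · omega
  | case3 i run hlt hm ih =>
    intro hi hrun
    rw [arun, if_pos hlt, if_neg hm]
    rw [ih (by omega) (by omega)]
    have hm' : ¬ a.getD i "" = a.getD (i - 1) "" := by simpa using hm
    have e1 : i + 1 - 1 = i := by omega
    have e2 : i + 1 - 2 = i - 1 := by omega
    constructor
    · rintro (⟨j, hj, hT⟩ | ⟨h2, _, _⟩)
      · exact Or.inl ⟨j, by omega, hT⟩
      · omega
    · rintro (⟨j, hj, hT⟩ | ⟨_, _, hx⟩)
      · rcases Nat.eq_or_lt_of_le hj with rfl | hlt2
        · obtain ⟨_, _, _, ha2⟩ := hT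
          rw [e1, e2] at ha2
          exact absurd ha2 hm'
        · exact Or.inl ⟨j, by omega, hT⟩
      · exact absurd hx hm'
  | case4 i run hge =>
    intro hi hrun
    rw [arun, if_neg hge]
    simp only [Bool.false_eq_true, false_iff]
    rintro (⟨j, hj, ⟨_, hjl, _⟩⟩ | ⟨_, h1, _⟩)
    · omega
    · omega

lemma slice2 (a : List String) (i : Nat) (h : i + 2 ≤ a.length) :
    PySem.List.slice a (some (i : Int)) (some ((i : Int) + 2)) = [a.getD i "", a.getD (i + 1) ""] := by
  have e : ((i : Int) + 2) = ((i + 2 : Nat) : Int) := by push_cast; ring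
  rw [e, PySem.List.slice_natCast]
  have h1 : i < a.length := by omega
  have h2 : i + 1 < a.length := by omega
  have e2 : i + 2 - i = 2 := by omega
  rw [e2, List.drop_eq_getElem_cons h1, List.drop_eq_getElem_cons h2]
  simp only [List.take_succ_cons, List.take_zero]
  rw [List.getD_eq_getElem a "" h1, List.getD_eq_getElem a "" h2]

lemma cond_iff (a : List String) (i : Nat) (h : i + 6 ≤ a.length) :
    (((PySem.List.slice a (some (i : Int)) (some ((i : Int) + 2)) ==
          PySem.List.slice a (some ((i : Int) + 2)) (some ((i : Int) + 4))) &&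
       (PySem.List.slice a (some ((i : Int) + 2)) (some ((i : Int) + 4)) ==
          PySem.List.slice a (some ((i : Int) + 4)) (some ((i : Int) + 6)))) = true) ↔
      QuadAt a (i + 5) := by
  have c2 : ((i : Int) + 2) = (((i + 2 : Nat)) : Int) := by push_cast; ring
  have c4 : ((i : Int) + 4) = ((((i + 2 : Nat)) : Int) + 2) := by push_cast; ring
  have c4' : ((i : Int) + 4) = (((i + 4 : Nat)) : Int) := by push_cast; ring
  have c6 : ((i : Int) + 6) = ((((i + 4 : Nat)) : Int) + 2) := by push_cast; ring
  rw [slice2 a i (by omega)]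
  rw [c2, c4, slice2 a (i + 2) (by omega)]
  rw [← c4, c4', c6, slice2 a (i + 4) (by omega)]
  have e1 : i + 5 - 1 = i + 4 := by omega
  have e2 : i + 5 - 2 = i + 3 := by omega
  have e3 : i + 5 - 3 = i + 2 := by omega
  have e4 : i + 5 - 4 = i + 1 := by omega
  have e5 : i + 5 - 5 = i := by omega
  have e6 : i + 2 + 1 = i + 3 := by omega
  have e7 : i + 4 + 1 = i + 5 := by omega
  rw [e6, e7]
  simp only [Bool.and_eq_true, beq_iff_eq, List.cons.injEq, and_true]
  unfold QuadAt
  rw [e1, e2, e3, e4, e5]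
  constructor
  · rintro ⟨⟨g02, g13⟩, ⟨g24, g35⟩⟩
    exact ⟨by omega, by omega, g35.symm, g24.symm, g13.symm, g02.symm⟩
  · rintro ⟨_, _, q1, q2, q3, q4⟩
    exact ⟨⟨q4.symm, q3.symm⟩, ⟨q2.symm, q1.symm⟩⟩

lemma abig_spec (a : List String) : ∀ i, (abig a i = true ↔ ∃ j, i ≤ j ∧ QuadAt a (j + 5)) := by
  intro i
  induction i using abig.induct (a := a) with
  | case1 i hlt hc =>
    rw [abig, if_pos hlt, if_pos hc]
    simp only [true_iff]
    exact ⟨i, le_refl _, (cond_iff a i (by omega)).mp hc⟩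
  | case2 i hlt hc ih =>
    rw [abig, if_pos hlt, if_neg hc]
    rw [ih]
    constructor
    · rintro ⟨j, hj, hQ⟩
      exact ⟨j, by omega, hQ⟩
    · rintro ⟨j, hj, hQ⟩
      rcases Nat.eq_or_lt_of_le hj with rfl | hlt2
      · exact absurd ((cond_iff a _ (by omega)).mpr hQ) hc
      · exact ⟨j, by omega, hQ⟩
  | case3 i hge =>
    rw [abig, if_neg hge]
    simp only [Bool.false_eq_true, false_iff]
    rintro ⟨j, hj, ⟨_, hl, _⟩⟩
    omega

lemma bloop_spec (a : List String) : ∀ i eq p2, 1 ≤ i →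
    ((1 ≤ eq) ↔ (2 ≤ i ∧ a.getD (i - 1) "" = a.getD (i - 2) "")) →
    ((1 ≤ p2) ↔ (3 ≤ i ∧ a.getD (i - 1) "" = a.getD (i - 3) "")) →
    ((2 ≤ p2) ↔ (4 ≤ i ∧ a.getD (i - 1) "" = a.getD (i - 3) "" ∧ a.getD (i - 2) "" = a.getD (i - 4) "")) →
    ((3 ≤ p2) ↔ (5 ≤ i ∧ a.getD (i - 1) "" = a.getD (i - 3) "" ∧ a.getD (i - 2) "" = a.getD (i - 4) "" ∧ a.getD (i - 3) "" = a.getD (i - 5) "")) →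
    (bloop a i eq p2 = true ↔ ∃ j, i ≤ j ∧ (TripAt a j ∨ QuadAt a j)) := by
  have base : ∀ i eq p2, ¬ i < a.length →
      (bloop a i eq p2 = true ↔ ∃ j, i ≤ j ∧ (TripAt a j ∨ QuadAt a j)) := by
    intro i eq p2 hge
    rw [bloop, if_neg hge]
    simp only [Bool.false_eq_true, false_iff]
    rintro ⟨j, hj, hT | hQ⟩
    · obtain ⟨_, hl, _⟩ := hT; omega
    · obtain ⟨_, hl, _⟩ := hQ; omega
  have main : ∀ n i eq p2, a.length - i ≤ n → 1 ≤ i →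
      ((1 ≤ eq) ↔ (2 ≤ i ∧ a.getD (i - 1) "" = a.getD (i - 2) "")) →
      ((1 ≤ p2) ↔ (3 ≤ i ∧ a.getD (i - 1) "" = a.getD (i - 3) "")) →
      ((2 ≤ p2) ↔ (4 ≤ i ∧ a.getD (i - 1) "" = a.getD (i - 3) "" ∧ a.getD (i - 2) "" = a.getD (i - 4) "")) →
      ((3 ≤ p2) ↔ (5 ≤ i ∧ a.getD (i - 1) "" = a.getD (i - 3) "" ∧ a.getD (i - 2) "" = a.getD (i - 4) "" ∧ a.getD (i - 3) "" = a.getD (i - 5) "")) →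
      (bloop a i eq p2 = true ↔ ∃ j, i ≤ j ∧ (TripAt a j ∨ QuadAt a j)) := by
    intro n
    induction n with
    | zero =>
      intro i eq p2 hf hi _ _ _ _
      exact base i eq p2 (by omega)
    | succ n ih =>
      intro i eq p2 hf hi Heq H1 H2 H3
      by_cases hlt : i < a.length
      swap
      · exact base i eq p2 hlt
      rw [exists_ge_succ_iff]
      have e1 : i + 1 - 1 = i := by omega
      have e2 : i + 1 - 2 = i - 1 := by omega
      have e3 : i + 1 - 3 = i - 2 := by omega
      have e4 : i + 1 - 4 = i - 3 := by omega
      have e5 : i + 1 - 5 = i - 4 := by omega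
      by_cases hm1 : (a.getD i "" == a.getD (i - 1) "") = true
      · have hm1' : a.getD i "" = a.getD (i - 1) "" := by simpa using hm1
        by_cases heq : 1 ≤ eq
        · -- eq-trigger fires: three in a row ending at i
          have hT : TripAt a i := ⟨(Heq.mp heq).1, hlt, hm1', (Heq.mp heq).2⟩
          rw [bloop, if_pos hlt]
          simp only [hm1, if_true]
          rw [if_pos (by omega : 2 ≤ eq + 1)]
          simp only [true_iff]
          exact Or.inl (Or.inl hT)
        · -- match but no trigger yet: eq' = eq + 1 = 1
          have heq0 : eq = 0 := by omega
          have hnT : ¬ TripAt a i := by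
            rintro ⟨h2i, _, _, hh⟩
            exact heq (Heq.mpr ⟨h2i, hh⟩)
          have Heq' : (1 ≤ eq + 1) ↔ (2 ≤ i + 1 ∧ a.getD (i + 1 - 1) "" = a.getD (i + 1 - 2) "") := by
            rw [e1, e2]
            constructor
            · intro _; exact ⟨by omega, hm1'⟩
            · intro _; omega
          rw [bloop, if_pos hlt]
          simp only [hm1, if_true]
          rw [if_neg (by omega : ¬ 2 ≤ eq + 1)]
          by_cases h2i : 2 ≤ i
          · rw [if_pos h2i]
            by_cases hm2 : (a.getD i "" == a.getD (i - 2) "") = true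
            · have hm2' : a.getD i "" = a.getD (i - 2) "" := by simpa using hm2
              simp only [hm2, if_true]
              by_cases hp3 : 3 ≤ p2
              · -- p2-trigger fires: quad ending at i
                obtain ⟨h5, q1, q2, q3⟩ := H3.mp hp3
                rw [if_pos (by omega : 4 ≤ p2 + 1)]
                simp only [true_iff]
                exact Or.inl (Or.inr ⟨h5, hlt, hm2', q1, q2, q3⟩)
              · have hnQ : ¬ QuadAt a i := by
                  rintro ⟨h5, _, _, q1, q2, q3⟩
                  exact hp3 (H3.mpr ⟨h5, q1, q2, q3⟩)
                rw [if_neg (by omega : ¬ 4 ≤ p2 + 1)]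
                rw [ih (i + 1) (eq + 1) (p2 + 1) (by omega) (by omega) Heq'
                    (by rw [e1, e3]; constructor
                        · intro _; exact ⟨by omega, hm2'⟩
                        · intro _; omega)
                    (by rw [e1, e2, e3, e4]
                        constructor
                        · intro h; have := H1.mp (by omega); exact ⟨by omega, hm2', this.2⟩
                        · rintro ⟨h4, _, hb⟩; have := H1.mpr ⟨by omega, hb⟩; omega)
                    (by rw [e1, e2, e3, e4, e5]
                        constructor
                        · intro h; have := H2.mp (by omega); exact ⟨by omega, hm2', this.2.1, this.2.2⟩
                        · rintro ⟨h5, _, hb, hc⟩; have := H2.mpr ⟨by omega, hb, hc⟩; omega)]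
                constructor
                · intro h; exact Or.inr h
                · rintro (hTQ | h)
                  · rcases hTQ with hT | hQ
                    · exact absurd hT hnT
                    · exact absurd hQ hnQ
                  · exact h
            · have hm2' : ¬ a.getD i "" = a.getD (i - 2) "" := by simpa using hm2
              have hnQ : ¬ QuadAt a i := by
                rintro ⟨_, _, hq, _⟩
                exact hm2' hq
              simp only [hm2, Bool.false_eq_true, if_false]
              rw [if_neg (by omega : ¬ 4 ≤ 0)]
              rw [ih (i + 1) (eq + 1) 0 (by omega) (by omega) Heq'
                  (by rw [e1, e3]
                      constructor
                      · intro h; omega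
                      · rintro ⟨_, hb⟩; exact absurd hb hm2')
                  (by rw [e1, e3]
                      constructor
                      · intro h; omega
                      · rintro ⟨_, hb, _⟩; exact absurd hb hm2')
                  (by rw [e1, e3]
                      constructor
                      · intro h; omega
                      · rintro ⟨_, hb, _⟩; exact absurd hb hm2')]
              constructor
              · intro h; exact Or.inr h
              · rintro (hTQ | h)
                · rcases hTQ with hT | hQ
                  · exact absurd hT hnT
                  · exact absurd hQ hnQ
                · exact h
          · -- i = 1: per2 is not yet updated
            have hi1 : i = 1 := by omega
            have hp0 : p2 = 0 := by
              by_contra hp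
              have := H1.mp (by omega)
              omega
            have hnQ : ¬ QuadAt a i := by
              rintro ⟨h5, _⟩; omega
            rw [if_neg h2i]
            rw [ih (i + 1) (eq + 1) p2 (by omega) (by omega) Heq'
                (by subst hi1 hp0; simp)
                (by subst hi1 hp0; simp)
                (by subst hi1 hp0; simp)]
            constructor
            · intro h; exact Or.inr h
            · rintro (hTQ | h)
              · rcases hTQ with hT | hQ
                · exact absurd hT hnT
                · exact absurd hQ hnQ
              · exact h
      · -- no adjacent match: eq' = 0
        have hm1' : ¬ a.getD i "" = a.getD (i - 1) "" := by simpa using hm1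
        have hnT : ¬ TripAt a i := by
          rintro ⟨_, _, hh, _⟩
          exact hm1' hh
        have Heq' : (1 ≤ 0) ↔ (2 ≤ i + 1 ∧ a.getD (i + 1 - 1) "" = a.getD (i + 1 - 2) "") := by
          rw [e1, e2]
          constructor
          · intro h; omega
          · rintro ⟨_, hb⟩; exact absurd hb hm1'
        rw [bloop, if_pos hlt]
        simp only [hm1, Bool.false_eq_true, if_false]
        rw [if_neg (by omega : ¬ 2 ≤ 0)]
        by_cases h2i : 2 ≤ i
        · rw [if_pos h2i]
          by_cases hm2 : (a.getD i "" == a.getD (i - 2) "") = true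
          · have hm2' : a.getD i "" = a.getD (i - 2) "" := by simpa using hm2
            simp only [hm2, if_true]
            by_cases hp3 : 3 ≤ p2
            · obtain ⟨h5, q1, q2, q3⟩ := H3.mp hp3
              rw [if_pos (by omega : 4 ≤ p2 + 1)]
              simp only [true_iff]
              exact Or.inl (Or.inr ⟨h5, hlt, hm2', q1, q2, q3⟩)
            · have hnQ : ¬ QuadAt a i := by
                rintro ⟨h5, _, _, q1, q2, q3⟩
                exact hp3 (H3.mpr ⟨h5, q1, q2, q3⟩)
              rw [if_neg (by omega : ¬ 4 ≤ p2 + 1)]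
              rw [ih (i + 1) 0 (p2 + 1) (by omega) (by omega) Heq'
                  (by rw [e1, e3]; constructor
                      · intro _; exact ⟨by omega, hm2'⟩
                      · intro _; omega)
                  (by rw [e1, e2, e3, e4]
                      constructor
                      · intro h; have := H1.mp (by omega); exact ⟨by omega, hm2', this.2⟩
                      · rintro ⟨h4, _, hb⟩; have := H1.mpr ⟨by omega, hb⟩; omega)
                  (by rw [e1, e2, e3, e4, e5]
                      constructor
                      · intro h; have := H2.mp (by omega); exact ⟨by omega, hm2', this.2.1, this.2.2⟩
                      · rintro ⟨h5, _, hb, hc⟩; have := H2.mpr ⟨by omega, hb, hc⟩; omega)]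
              constructor
              · intro h; exact Or.inr h
              · rintro (hTQ | h)
                · rcases hTQ with hT | hQ
                  · exact absurd hT hnT
                  · exact absurd hQ hnQ
                · exact h
          · have hm2' : ¬ a.getD i "" = a.getD (i - 2) "" := by simpa using hm2
            have hnQ : ¬ QuadAt a i := by
              rintro ⟨_, _, hq, _⟩
              exact hm2' hq
            simp only [hm2, Bool.false_eq_true, if_false]
            rw [if_neg (by omega : ¬ 4 ≤ 0)]
            rw [ih (i + 1) 0 0 (by omega) (by omega) Heq'
                (by rw [e1, e3]
                    constructor
                    · intro h; omega
                    · rintro ⟨_, hb⟩; exact absurd hb hm2')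
                (by rw [e1, e3]
                    constructor
                    · intro h; omega
                    · rintro ⟨_, hb, _⟩; exact absurd hb hm2')
                (by rw [e1, e3]
                    constructor
                    · intro h; omega
                    · rintro ⟨_, hb, _⟩; exact absurd hb hm2')]
            constructor
            · intro h; exact Or.inr h
            · rintro (hTQ | h)
              · rcases hTQ with hT | hQ
                · exact absurd hT hnT
                · exact absurd hQ hnQ
              · exact h
        · have hi1 : i = 1 := by omega
          have hp0 : p2 = 0 := by
            by_contra hp
            have := H1.mp (by omega)
            omega
          have hnQ : ¬ QuadAt a i := by
            rintro ⟨h5, _⟩; omega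
          rw [if_neg h2i]
          rw [ih (i + 1) 0 p2 (by omega) (by omega) Heq'
              (by subst hi1 hp0; simp)
              (by subst hi1 hp0; simp)
              (by subst hi1 hp0; simp)]
          constructor
          · intro h; exact Or.inr h
          · rintro (hTQ | h)
            · rcases hTQ with hT | hQ
              · exact absurd hT hnT
              · exact absurd hQ hnQ
            · exact h
  intro i eq p2 hi Heq H1 H2 H3
  exact main (a.length - i) i eq p2 (le_refl _) hi Heq H1 H2 H3

-- ===== VERDICT (by name: the statement is the Claim_ definition above) =====
theorem has_stutter_loop_spec : Claim_equal_has_stutter_loop := by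
  intro tokens _
  unfold Spec_has_stutter_loop
  show has_stutter_loop tokens = has_stutter_loop_alt tokens
  simp only [has_stutter_loop, has_stutter_loop_alt, alpha_tokens]
  by_cases h4 : (tokens.filter (fun t => PySem.Str.strIsalpha t)).length < 4
  · rw [if_pos h4, if_pos h4]
  · rw [if_neg h4, if_neg h4]
    set a := tokens.filter (fun t => PySem.Str.strIsalpha t) with ha
    rw [Bool.eq_iff_iff]
    rw [bloop_spec a 1 0 0 (le_refl _)
        (⟨fun h => absurd h (by omega), fun h => absurd h.1 (by omega)⟩)
        (⟨fun h => absurd h (by omega), fun h => absurd h.1 (by omega)⟩)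
        (⟨fun h => absurd h (by omega), fun h => absurd h.1 (by omega)⟩)
        (⟨fun h => absurd h (by omega), fun h => absurd h.1 (by omega)⟩)]
    constructor
    · intro h
      split_ifs at h with h1 h2
      · rcases (arun_spec a 1 1 (le_refl _) (le_refl _)).mp h1 with ⟨j, hj, hT⟩ | ⟨h2r, _⟩
        · exact ⟨j, by omega, Or.inl hT⟩
        · omega
      · rcases (abig_spec a 0).mp h with ⟨j, _, hQ⟩
        have h5 : 5 ≤ j + 5 := by omega
        exact ⟨j + 5, by omega, Or.inr hQ⟩
    · rintro ⟨j, hj, hT | hQ⟩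
      · have har : arun a 1 1 = true :=
          (arun_spec a 1 1 (le_refl _) (le_refl _)).mpr (Or.inl ⟨j, hT.1, hT⟩)
        simp [har]
      · by_cases h1 : arun a 1 1 = true
        · simp [h1]
        · have h6 : 6 ≤ a.length := by obtain ⟨h5, hl, _⟩ := hQ; omega
          have hb : abig a 0 = true := (abig_spec a 0).mpr ⟨j - 5, by omega, by
            have hj5 : j - 5 + 5 = j := by obtain ⟨h5, _⟩ := hQ; omega
            rw [hj5]; exact hQ⟩
          simp [h1, h6, hb]
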